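-- pv_equiv track=rewrite | github.com/sueszli/vector-database-benchmark | dataset/python-mutated/asset_wih_monitor.py | domain_in_scope_domain
-- ===== SOURCE A (Python) =====
-- def domain_in_scope_domain(domain: str, scope_domain: list):
--     if False:
--         i = 10
--         return i + 15
--     for scope in scope_domain:
--         if domain.endswith('.' + scope):
--             return True
--     return False
-- ===== SOURCE B (Python) =====
-- def domain_in_scope_domain(domain: str, scope_domain: list):
--     scopes = set(scope_domain)
--     rest = domain
--     while rest:
--         head, rest = rest[0], rest[1:]
--         if head == '.' and rest in scopes:
--             return True
--     return False
-- ===== Notes on version B (the rewrite author's own statement) =====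
-- stated objective: alternative
-- what changed: B builds a set from scope_domain once and scans the domain's characters, testing for each dot whether the suffix after it is in the set, instead of scanning the scope list and calling endswith per scope.
import Mathlib
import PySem

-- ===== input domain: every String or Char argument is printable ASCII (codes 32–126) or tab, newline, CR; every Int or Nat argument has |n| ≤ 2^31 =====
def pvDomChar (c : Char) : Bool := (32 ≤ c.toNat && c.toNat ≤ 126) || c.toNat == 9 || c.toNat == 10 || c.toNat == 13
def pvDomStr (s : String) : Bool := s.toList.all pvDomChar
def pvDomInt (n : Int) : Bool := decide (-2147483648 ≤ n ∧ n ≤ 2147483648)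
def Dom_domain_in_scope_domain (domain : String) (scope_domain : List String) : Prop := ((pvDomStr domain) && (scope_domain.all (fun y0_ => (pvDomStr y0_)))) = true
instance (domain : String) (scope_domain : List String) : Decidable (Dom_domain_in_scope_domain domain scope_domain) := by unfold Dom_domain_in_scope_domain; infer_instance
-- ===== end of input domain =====

-- B replaces A's per-scope endswith scan by one pass over the domain testing each dot's suffix
-- against a set built once from scope_domain (objective: alternative data-structure formulation).

-- ===== PORT A =====
-- A's 'if False:' block is dead code and is omitted; the for-loop with early return
-- becomes structural recursion over scope_domain.
def pvA_loop (domain : String) (scopes : List String) : Bool :=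
  match scopes with
  | [] => false
  | s :: rest =>
    if PySem.Str.endswith domain ("." ++ s) then true else pvA_loop domain rest

def domain_in_scope_domain (domain : String) (scope_domain : List String) : Bool :=
  pvA_loop domain scope_domain

-- ===== PORT B =====
-- Source B's while-loop strips one character per step (head, rest); on each '.' it tests the
-- remaining suffix for membership in the set built once from scope_domain.
def pvB_loop (rest : List Char) (scopes : PySem.Set String) : Bool :=
  match rest with
  | [] => false
  | c :: rs =>
    if c == '.' && PySem.Set.contains scopes (String.ofList rs) then true else pvB_loop rs scopes

def domain_in_scope_domain_alt (domain : String) (scope_domain : List String) : Bool :=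
  pvB_loop domain.toList (PySem.Set.ofList scope_domain)

-- ===== PRECONDITION & SPEC =====
def Spec_domain_in_scope_domain (domain : String) (scope_domain : List String) (out : Bool) : Prop := out = domain_in_scope_domain_alt domain scope_domain
instance (domain : String) (scope_domain : List String) (out : Bool) : Decidable (Spec_domain_in_scope_domain domain scope_domain out) := by unfold Spec_domain_in_scope_domain; infer_instance

-- ===== CLAIM (what is proved, stated in full; the proofs are below) =====
def Claim_equal_domain_in_scope_domain : Prop := ∀ (domain : String) (scope_domain : List String), Dom_domain_in_scope_domain domain scope_domain → Spec_domain_in_scope_domain domain scope_domain (domain_in_scope_domain domain scope_domain)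

-- ===== LEMMAS AND PROOFS =====

-- Both loops return true exactly when the domain splits as pre ++ '.' :: rs with rs a scope.
theorem pvA_loop_iff (d : String) (scopes : List String) :
    pvA_loop d scopes = true ↔ ∃ s ∈ scopes, ∃ pre, d.toList = pre ++ '.' :: s.toList := by
  induction scopes with
  | nil => simp [pvA_loop]
  | cons s rest ih =>
    have hend : PySem.Str.endswith d ("." ++ s) = true ↔
        ∃ pre, d.toList = pre ++ '.' :: s.toList := by
      rw [PySem.Str.endswith_eq, PySem.Chars.endswith_iff]
      constructor
      · rintro ⟨pre, hpre⟩; exact ⟨pre, by simpa using hpre.symm⟩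
      · rintro ⟨pre, hpre⟩; exact ⟨pre, by simpa using hpre.symm⟩
    cases h : PySem.Str.endswith d ("." ++ s) with
    | true =>
      simp only [pvA_loop, h, if_true, true_iff]
      exact ⟨s, List.mem_cons_self .., hend.mp h⟩
    | false =>
      simp only [pvA_loop, h, Bool.false_eq_true, if_false, ih]
      constructor
      · rintro ⟨t, ht, hsuf⟩; exact ⟨t, List.mem_cons_of_mem _ ht, hsuf⟩
      · rintro ⟨t, ht, hsuf⟩
        rcases List.mem_cons.mp ht with heq | ht'
        · exact absurd (hend.mpr (heq ▸ hsuf)) (by rw [h]; simp)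
        · exact ⟨t, ht', hsuf⟩

theorem pvB_loop_iff (cs : List Char) (S : PySem.Set String) :
    pvB_loop cs S = true ↔ ∃ pre rs, cs = pre ++ '.' :: rs ∧ String.ofList rs ∈ S := by
  induction cs with
  | nil =>
    simp only [pvB_loop]
    constructor
    · intro h; exact absurd h (by simp)
    · rintro ⟨pre, rs, h, -⟩
      exact absurd ((List.append_eq_nil_iff.mp h.symm).2) (List.cons_ne_nil _ _)
  | cons c rs ih =>
    cases h : (c == '.' && PySem.Set.contains S (String.ofList rs)) with
    | true =>
      simp only [pvB_loop, h, if_true, true_iff]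
      rw [Bool.and_eq_true, beq_iff_eq] at h
      exact ⟨[], rs, by simp [h.1], (PySem.Set.contains_iff ..).mp h.2⟩
    | false =>
      simp only [pvB_loop, h, Bool.false_eq_true, if_false, ih]
      constructor
      · rintro ⟨pre, rs', hsplit, hmem⟩
        exact ⟨c :: pre, rs', by simp [hsplit], hmem⟩
      · rintro ⟨pre, rs', hsplit, hmem⟩
        cases pre with
        | nil =>
          exfalso
          simp only [List.nil_append, List.cons.injEq] at hsplit
          have : (c == '.' && PySem.Set.contains S (String.ofList rs)) = true := by
            rw [Bool.and_eq_true, beq_iff_eq]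
            exact ⟨hsplit.1, by rw [← hsplit.2] at hmem; exact (PySem.Set.contains_iff ..).mpr hmem⟩
          rw [this] at h; exact Bool.noConfusion h
        | cons p ps =>
          simp only [List.cons_append, List.cons.injEq] at hsplit
          exact ⟨ps, rs', hsplit.2, hmem⟩

-- ===== VERDICT (by name: the statement is the Claim_ definition above) =====
theorem domain_in_scope_domain_spec : Claim_equal_domain_in_scope_domain := by
  intro domain scope_domain _
  unfold Spec_domain_in_scope_domain domain_in_scope_domain domain_in_scope_domain_alt
  rw [Bool.eq_iff_iff, pvA_loop_iff, pvB_loop_iff]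
  constructor
  · rintro ⟨s, hs, pre, hsplit⟩
    exact ⟨pre, s.toList, hsplit, by
      simp only [String.ofList_toList]
      exact (PySem.Set.mem_ofList ..).mpr hs⟩
  · rintro ⟨pre, rs, hsplit, hmem⟩
    refine ⟨String.ofList rs, (PySem.Set.mem_ofList ..).mp hmem, pre, ?_⟩
    simpa using hsplit
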